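-- pv_equiv track=rewrite | github.com/sergeydumchikov/projectOOP2 | Module22/03_zen_of_python_2/main.py | rare_letter
-- ===== SOURCE A (Python) =====
-- def rare_letter(text, rare_dict):
--     del_sings = [' ', '!', '\n', '?', '.', ',', "'", '#', '*']
--     for i_let in text.lower():
--         if i_let in rare_dict:
--             rare_dict[i_let] += 1
--             continue
--         if i_let not in del_sings:
--             rare_dict[i_let] = 1
--
--     return rare_dict
-- ===== SOURCE B (Python) =====
-- def rare_letter(text, rare_dict):
--     del_sings = [' ', '!', '\n', '?', '.', ',', "'", '#', '*']
--     low = text.lower()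
--     # one counting pass over the lowered text
--     cnt = {}
--     for c in low:
--         cnt[c] = cnt.get(c, 0) + 1
--     # bump every existing entry by its key's total character count
--     for k in rare_dict:
--         rare_dict[k] += cnt.get(k, 0)
--     # append each fresh non-punctuation character once, with its total count
--     seen = set(rare_dict)
--     for ch in low:
--         if ch not in seen and ch not in del_sings:
--             rare_dict[ch] = cnt[ch]
--             seen.add(ch)
--     return rare_dict
-- ===== Notes on version B (the rewrite author's own statement) =====
-- stated objective: alternative
-- what changed: B replaces A's per-character increment-or-insert dict loop by three staged passes: a counting pass building a per-character frequency dict of text.lower(), a bump pass adding each existing key's total count to its entry, and a single scan with a seen-set appending each fresh non-punctuation character once with its total count.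
import Mathlib
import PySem

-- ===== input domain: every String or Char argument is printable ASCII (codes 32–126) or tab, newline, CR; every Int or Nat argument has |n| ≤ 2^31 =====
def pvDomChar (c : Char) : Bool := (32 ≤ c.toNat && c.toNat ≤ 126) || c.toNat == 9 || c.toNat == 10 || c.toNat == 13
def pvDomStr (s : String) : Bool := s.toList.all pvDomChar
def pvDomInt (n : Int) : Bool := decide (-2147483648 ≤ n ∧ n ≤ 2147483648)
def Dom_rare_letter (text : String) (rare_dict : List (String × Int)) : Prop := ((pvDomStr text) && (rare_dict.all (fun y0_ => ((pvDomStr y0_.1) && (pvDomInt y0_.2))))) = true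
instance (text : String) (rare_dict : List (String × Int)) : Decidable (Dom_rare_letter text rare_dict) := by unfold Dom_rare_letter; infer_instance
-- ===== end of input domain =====

-- B replaces A's per-character increment-or-insert loop by three staged passes (count the
-- characters of text.lower(), bump existing entries by their totals, then append each fresh
-- non-punctuation character once); alternative decomposition, no speed claim. Both Pythons mutate rare_dict in place and
-- return it; the equivalence proved is about the returned value (the Lean ports are pure).

-- ===== PORT A =====
def pvPunct : List String := [" ", "!", "\n", "?", ".", ",", "'", "#", "*"]

-- A's loop body, per character of text.lower()
def pvLoopA (d : PySem.Dict String Int) (i_let : String) : PySem.Dict String Int :=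
  if d.contains i_let then d.modify i_let 0 (· + 1)
  else if pvPunct.contains i_let then d
  else d.insert i_let 1

def rare_letter (text : String) (rare_dict : List (String × Int)) : List (String × Int) :=
  ((PySem.Str.lower text).toList.foldl (fun d c => pvLoopA d (String.ofList [c]))
    (PySem.Dict.ofList rare_dict)).items

-- ===== PORT B =====
-- low = text.lower() as its list of one-character strings
def pvLow (text : String) : List String :=
  (PySem.Str.lower text).toList.map (fun c => String.ofList [c])

-- B's counting pass: cnt[c] = cnt.get(c, 0) + 1 over low
def pvCnt (low : List String) : PySem.Dict String Int :=
  low.foldl (fun d c => d.insert c (d.getD c 0 + 1)) PySem.Dict.empty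

-- B's second loop: each existing entry bumped by cnt.get(k, 0)
def pvUpd (cnt : PySem.Dict String Int) (rare_dict : List (String × Int)) : List (String × Int) :=
  (PySem.Dict.ofList rare_dict).items.map (fun p => (p.1, p.2 + cnt.getD p.1 0))

-- B's third loop body: append ch once if it is fresh and not punctuation
def pvLoopB (cnt : PySem.Dict String Int) (st : List (String × Int) × PySem.Set String) (ch : String) :
    List (String × Int) × PySem.Set String :=
  if !(PySem.Set.contains st.2 ch) && !(pvPunct.contains ch) then
    (st.1 ++ [(ch, cnt.getD ch 0)], PySem.Set.add st.2 ch)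
  else st

def rare_letter_alt (text : String) (rare_dict : List (String × Int)) : List (String × Int) :=
  ((pvLow text).foldl (pvLoopB (pvCnt (pvLow text)))
    (pvUpd (pvCnt (pvLow text)) rare_dict,
     PySem.Set.ofList ((pvUpd (pvCnt (pvLow text)) rare_dict).map Prod.fst))).1

-- ===== PRECONDITION & SPEC =====
def Spec_rare_letter (text : String) (rare_dict : List (String × Int)) (out : List (String × Int)) : Prop := out = rare_letter_alt text rare_dict
instance (text : String) (rare_dict : List (String × Int)) (out : List (String × Int)) : Decidable (Spec_rare_letter text rare_dict out) := by unfold Spec_rare_letter; infer_instance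

-- ===== CLAIM (what is proved, stated in full; the proofs are below) =====
def Claim_equal_rare_letter : Prop := ∀ (text : String) (rare_dict : List (String × Int)), Dom_rare_letter text rare_dict → Spec_rare_letter text rare_dict (rare_letter text rare_dict)

-- ===== LEMMAS AND PROOFS =====

-- proof-side skeleton of the fresh keys added by either program: the characters of ks not in
-- `seen` and not punctuation, first occurrences in order
def pvFresh : List String → List String → List String
  | [], _ => []
  | k :: ks, seen =>
      if seen.contains k || pvPunct.contains k then pvFresh ks seen
      else k :: pvFresh ks (seen ++ [k])

theorem pvFresh_cons (k : String) (ks seen : List String) :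
    pvFresh (k :: ks) seen =
      if seen.contains k || pvPunct.contains k then pvFresh ks seen
      else k :: pvFresh ks (seen ++ [k]) := rfl

theorem pvFresh_subset (ks seen : List String) (x : String) (hx : x ∈ pvFresh ks seen) :
    x ∉ seen ∧ x ∉ pvPunct := by
  induction ks generalizing seen with
  | nil => simp [pvFresh] at hx
  | cons k ks ih =>
    unfold pvFresh at hx
    split_ifs at hx with h
    · exact ih seen hx
    · rcases List.mem_cons.mp hx with rfl | hx'
      · simp only [Bool.or_eq_true, List.contains_eq_mem, decide_eq_true_eq] at h
        rw [not_or] at h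
        exact ⟨fun hm => h.1 (by simpa using hm), fun hm => h.2 (by simpa using hm)⟩
      · have := ih (seen ++ [k]) hx'
        refine ⟨fun hs => this.1 (List.mem_append_left _ hs), this.2⟩

theorem pvFresh_complete (ks seen : List String) (x : String)
    (hks : x ∈ ks) (hs : x ∉ seen) (hp : x ∉ pvPunct) : x ∈ pvFresh ks seen := by
  induction ks generalizing seen with
  | nil => simp at hks
  | cons k ks ih =>
    unfold pvFresh
    rcases List.mem_cons.mp hks with rfl | hks'
    · rw [if_neg (by simp [hs, hp])]
      exact List.mem_cons_self
    · split_ifs with h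
      · exact ih seen hks' hs
      · by_cases hxk : x = k
        · exact hxk ▸ List.mem_cons_self
        · exact List.mem_cons_of_mem _ (ih (seen ++ [k]) hks' (by simp [hs, hxk]))

theorem pvFresh_nodup (ks seen : List String) : (pvFresh ks seen).Nodup := by
  induction ks generalizing seen with
  | nil => simp [pvFresh]
  | cons k ks ih =>
    unfold pvFresh
    split_ifs with h
    · exact ih seen
    · refine List.nodup_cons.mpr ⟨fun hk => ?_, ih (seen ++ [k])⟩
      exact (pvFresh_subset ks (seen ++ [k]) k hk).1 (by simp)

theorem pvFresh_append (ks seen : List String) (s : String) :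
    pvFresh (ks ++ [s]) seen =
      pvFresh ks seen ++
        (if s ∈ seen ∨ s ∈ pvFresh ks seen ∨ s ∈ pvPunct then [] else [s]) := by
  induction ks generalizing seen with
  | nil =>
    simp only [List.nil_append, pvFresh]
    split_ifs with h h2 <;> simp_all
  | cons k ks ih =>
    simp only [List.cons_append]
    by_cases h : (List.contains seen k || pvPunct.contains k) = true
    · rw [pvFresh_cons, if_pos h, pvFresh_cons, if_pos h]
      exact ih seen
    · rw [pvFresh_cons, if_neg h, pvFresh_cons, if_neg h]
      rw [ih (seen ++ [k])]
      have hcond : (s ∈ seen ++ [k] ∨ s ∈ pvFresh ks (seen ++ [k]) ∨ s ∈ pvPunct)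
          ↔ (s ∈ seen ∨ s ∈ k :: pvFresh ks (seen ++ [k]) ∨ s ∈ pvPunct) := by
        simp only [List.mem_append, List.mem_cons]
        tauto
      by_cases h1 : s ∈ seen ++ [k] ∨ s ∈ pvFresh ks (seen ++ [k]) ∨ s ∈ pvPunct
      · rw [if_pos h1, if_pos (hcond.mp h1)]
        simp
      · rw [if_neg h1, if_neg (fun hh => h1 (hcond.mpr hh))]
        simp

-- A's value bump on one existing entry
def pvBump (ks : List String) (p : String × Int) : String × Int := (p.1, p.2 + (ks.count p.1 : Int))

-- characterization of A's fold: existing entries bumped by their counts, then the fresh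
-- characters with their total counts
theorem pvA_items (ks : List String) (d : PySem.Dict String Int) (hnd : d.keys.Nodup) :
    (ks.foldl pvLoopA d).items
      = d.items.map (pvBump ks)
        ++ (pvFresh ks d.keys).map (fun k => (k, (ks.count k : Int))) := by
  induction ks using List.reverseRecOn with
  | nil =>
    simp only [List.foldl_nil, pvFresh, List.map_nil, List.append_nil]
    rw [List.map_congr_left (fun p _ => by simp [pvBump] : ∀ p ∈ d.items, pvBump [] p = p)]
    simp
  | append_singleton ks s ih =>
    rw [List.foldl_append, List.foldl_cons, List.foldl_nil]
    set E := ks.foldl pvLoopA d with hE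
    have hIt : E.items = d.items.map (pvBump ks)
        ++ (pvFresh ks d.keys).map (fun k => (k, (ks.count k : Int))) := ih
    have hK : E.keys = d.keys ++ pvFresh ks d.keys := by
      simp [PySem.Dict.keys, hIt, pvBump, Function.comp_def]
    have hKnd : E.keys.Nodup := by
      rw [hK]
      refine List.nodup_append.mpr ⟨hnd, pvFresh_nodup ks d.keys, ?_⟩
      intro a ha b hb hab
      exact (pvFresh_subset ks d.keys b hb).1 (hab ▸ ha)
    have hmemK : ∀ x, x ∈ E.keys ↔ x ∈ d.keys ∨ x ∈ pvFresh ks d.keys := by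
      intro x; rw [hK]; exact List.mem_append
    have hcont : E.contains s = decide (s ∈ E.keys) :=
      PySem.Dict.contains_eq_decide_mem_keys E s
    by_cases hsk : s ∈ d.keys ∨ s ∈ pvFresh ks d.keys
    · -- s is a key of E: the modify branch fires
      have hcs : E.contains s = true := by rw [hcont]; simp [hmemK s, hsk]
      rw [show pvLoopA E s = E.modify s 0 (· + 1) by unfold pvLoopA; rw [if_pos hcs]]
      -- the fresh list is unchanged
      have hF : pvFresh (ks ++ [s]) d.keys = pvFresh ks d.keys := by
        rw [pvFresh_append]; rw [if_pos (by tauto)]; simp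
      simp only [PySem.Dict.modify]
      have hcs' : E.contains s = true := hcs
      rw [PySem.Dict.items_insert_of_contains E _ hcs', hIt, hF]
      rw [List.map_append, List.map_map, List.map_map]
      congr 1
      · -- existing entries
        apply List.map_congr_left
        intro p hp
        simp only [Function.comp, pvBump, beq_iff_eq]
        by_cases hps : p.1 = s
        · have hmem : (p.1, p.2 + (ks.count p.1 : Int)) ∈ E.items := by
            rw [hIt]; exact List.mem_append_left _ (List.mem_map.mpr ⟨p, hp, rfl⟩)
          have hg : E.getD s 0 = p.2 + (ks.count p.1 : Int) := by
            rw [← hps]; exact PySem.Dict.getD_of_mem_items E hmem hKnd 0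
          rw [if_pos hps, hg, hps]
          simp [List.count_append]
          ring
        · rw [if_neg hps]
          have : (ks ++ [s]).count p.1 = ks.count p.1 := by
            rw [List.count_append]; simp [Ne.symm hps]
          rw [this]
      · -- fresh entries
        apply List.map_congr_left
        intro k hk
        simp only [Function.comp, beq_iff_eq]
        by_cases hks' : k = s
        · subst hks'
          have hsf : k ∈ pvFresh ks d.keys := by
            rcases hsk with h | h
            · exact absurd h (pvFresh_subset ks d.keys k hk).1
            · exact h
          have hmem : (k, (ks.count k : Int)) ∈ E.items := by
            rw [hIt]; exact List.mem_append_right _ (List.mem_map.mpr ⟨k, hsf, rfl⟩)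
          have hg : E.getD k 0 = (ks.count k : Int) :=
            PySem.Dict.getD_of_mem_items E hmem hKnd 0
          rw [if_pos rfl, hg]
          simp only [List.count_append, List.count_singleton]
          push_cast
          simp
        · rw [if_neg hks']
          have : (ks ++ [s]).count k = ks.count k := by
            rw [List.count_append]; simp [Ne.symm hks']
          rw [this]
    · rw [not_or] at hsk
      have hcs : E.contains s = false := by
        rw [hcont]; simp [hmemK s, hsk.1, hsk.2]
      by_cases hpu : s ∈ pvPunct
      · -- punctuation, not a key: skipped
        rw [show pvLoopA E s = E by
              unfold pvLoopA; rw [if_neg (by simp [hcs]), if_pos (by simpa using hpu)]]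
        have hF : pvFresh (ks ++ [s]) d.keys = pvFresh ks d.keys := by
          rw [pvFresh_append, if_pos (by tauto)]; simp
        rw [hIt, hF]
        congr 1
        · apply List.map_congr_left
          intro p hp
          have hps : p.1 ≠ s := fun h => hsk.1 (h ▸ PySem.Dict.mem_keys_of_mem_items d hp)
          simp only [pvBump]
          rw [show (ks ++ [s]).count p.1 = ks.count p.1 by
                rw [List.count_append]; simp [Ne.symm hps]]
        · apply List.map_congr_left
          intro k hk
          have hks' : k ≠ s := fun h => hsk.2 (h ▸ hk)
          rw [show (ks ++ [s]).count k = ks.count k by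
                rw [List.count_append]; simp [Ne.symm hks']]
      · -- brand new non-punctuation character: appended with value 1
        rw [show pvLoopA E s = E.insert s 1 by
              unfold pvLoopA; rw [if_neg (by simp [hcs]), if_neg (by simpa using hpu)]]
        rw [PySem.Dict.items_insert_of_not_contains E _ hcs, hIt,
            pvFresh_append, if_neg (by tauto)]
        have hcount : ks.count s = 0 := by
          rw [List.count_eq_zero]
          intro hmem
          exact hsk.2 (pvFresh_complete ks d.keys s hmem hsk.1 hpu)
        rw [List.map_append]
        rw [List.append_assoc]
        congr 1
        · apply List.map_congr_left
          intro p hp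
          have hps : p.1 ≠ s := fun h => hsk.1 (h ▸ PySem.Dict.mem_keys_of_mem_items d hp)
          simp only [pvBump]
          rw [show (ks ++ [s]).count p.1 = ks.count p.1 by
                rw [List.count_append]; simp [Ne.symm hps]]
        · congr 1
          · apply List.map_congr_left
            intro k hk
            have hks' : k ≠ s := fun h => hsk.2 (h ▸ hk)
            rw [show (ks ++ [s]).count k = ks.count k by
                  rw [List.count_append]; simp [Ne.symm hks']]
          · simp [List.count_append, hcount]

-- the counting pass computes occurrence counts
theorem pvCnt_getD (low : List String) (k : String) :
    (pvCnt low).getD k 0 = (low.count k : Int) := by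
  rw [pvCnt, PySem.Dict.getD_foldl_insert_add_one]
  simp [PySem.Dict.getD_empty]

-- characterization of B's appending scan
theorem pvB_fold (cnt : PySem.Dict String Int) (ks : List String)
    (acc : List (String × Int)) (seen : PySem.Set String) :
    (ks.foldl (pvLoopB cnt) (acc, seen)).1
      = acc ++ (pvFresh ks seen).map (fun k => (k, cnt.getD k 0)) := by
  induction ks generalizing acc seen with
  | nil => simp [pvFresh]
  | cons k ks ih =>
    simp only [List.foldl_cons]
    rw [pvFresh_cons]
    by_cases h : (List.contains seen k || pvPunct.contains k) = true
    · rw [if_pos h,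
          show pvLoopB cnt (acc, seen) k = (acc, seen) by
            unfold pvLoopB; rw [if_neg (by simp_all; tauto)]]
      exact ih acc seen
    · rw [if_neg h]
      simp only [Bool.or_eq_true, not_or, Bool.not_eq_true] at h
      rw [show pvLoopB cnt (acc, seen) k = (acc ++ [(k, cnt.getD k 0)], seen ++ [k]) by
            unfold pvLoopB
            rw [if_pos (by simp_all),
                PySem.Set.add_of_not_mem (by simpa using h.1)],
          ih]
      simp

set_option maxHeartbeats 1600000 in
theorem rare_letter_spec : Claim_equal_rare_letter := by
  intro text rare_dict _
  unfold Spec_rare_letter rare_letter rare_letter_alt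
  have hnd : (PySem.Dict.ofList rare_dict).keys.Nodup :=
    PySem.Dict.nodup_keys_ofList rare_dict
  have hfold : (PySem.Str.lower text).toList.foldl
        (fun d c => pvLoopA d (String.ofList [c])) (PySem.Dict.ofList rare_dict)
      = (pvLow text).foldl pvLoopA (PySem.Dict.ofList rare_dict) := by
    rw [pvLow, List.foldl_map]
  have hkeys : ((pvUpd (pvCnt (pvLow text)) rare_dict).map Prod.fst)
      = (PySem.Dict.ofList rare_dict).keys := by
    rw [pvUpd, List.map_map]
    exact List.map_congr_left (fun p _ => rfl)
  rw [hfold, pvA_items (pvLow text) (PySem.Dict.ofList rare_dict) hnd,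
      pvB_fold (pvCnt (pvLow text)) (pvLow text) _ _, hkeys,
      PySem.Set.ofList_eq_self_of_nodup _ hnd, pvUpd]
  congr 1
  · exact List.map_congr_left (fun p _ => by rw [pvBump, pvCnt_getD])
  · exact List.map_congr_left (fun k _ => by rw [pvCnt_getD])
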